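-- pv_equiv track=rewrite | github.com/jkim439/Coding-Test | Programmers/레벨2/60057.py | solution
-- ===== SOURCE A (Python) =====
-- def solution(s):
--     answer = len(s)
--
--     for i in range(1, len(s)):
--         temp = ""
--         ss = []
--         j = 0
--
--         while j < len(s):
--             ss.append(s[j : j + i])
--             j += i
--
--         while ss:
--             ss0 = ss.pop(0)
--             n = 1
--             while ss and ss0 == ss[0]:
--                 n += 1
--                 ss.pop(0)
--             if n == 1:
--                 temp += ss0
--             else:
--                 temp += str(n) + ss0
--         answer = min(answer, len(temp))
--     return answer
-- ===== SOURCE B (Python) =====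
-- def solution(s):
--     L = len(s)
--     best = L
--     for i in range(1, L):
--         total = 0
--         prev = None
--         cnt = 0
--         for c in [s[k:k + i] for k in range(0, L, i)]:
--             if c == prev:
--                 cnt += 1
--             else:
--                 if prev is not None:
--                     total += len(prev) + (len(str(cnt)) if cnt > 1 else 0)
--                 prev, cnt = c, 1
--         if prev is not None:
--             total += len(prev) + (len(str(cnt)) if cnt > 1 else 0)
--         best = min(best, total)
--     return best
-- ===== Notes on version B (the rewrite author's own statement) =====
-- stated objective: simpler
-- what changed: Replaces A's pop(0)-driven nested while loops that build the compressed string with a chunk-list comprehension and a single state-machine pass (prev, count, running integer total), never materialising the compressed string.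
import Mathlib
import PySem

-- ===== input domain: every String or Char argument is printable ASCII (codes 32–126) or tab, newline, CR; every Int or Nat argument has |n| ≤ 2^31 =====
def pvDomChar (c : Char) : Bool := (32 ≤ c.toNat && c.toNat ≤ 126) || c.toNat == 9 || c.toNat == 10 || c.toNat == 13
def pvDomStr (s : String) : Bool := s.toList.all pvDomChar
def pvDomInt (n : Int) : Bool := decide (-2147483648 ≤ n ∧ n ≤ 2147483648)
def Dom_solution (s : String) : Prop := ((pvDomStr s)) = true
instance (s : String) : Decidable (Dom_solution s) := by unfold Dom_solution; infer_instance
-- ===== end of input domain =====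

-- B replaces A's pop(0)-driven nested while loops building the compressed string by a chunk
-- comprehension plus one state-machine pass accumulating the length as an integer (simpler).

-- ===== PORT A =====

-- A's chunk-building while loop 'while j < len(s): ss.append(s[j:j+i]); j += i';
-- fuel = len(s) bounds the iteration count (the step i is ≥ 1 in every call A makes).
def chunksAux (cs : List Char) (i : Int) : Nat → Int → List (List Char)
  | 0, _ => []
  | fuel + 1, j =>
    if j < (cs.length : Int) then
      PySem.List.slice cs (some j) (some (j + i)) :: chunksAux cs i fuel (j + i)
    else []

-- A's inner counting loop: 'n = 1; while ss and ss0 == ss[0]: n += 1; ss.pop(0)';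
-- returns (extra count n-1, remaining list).
def runSplit (x : List Char) : List (List Char) → Nat × List (List Char)
  | [] => (0, [])
  | y :: t => if y = x then ((runSplit x t).1 + 1, (runSplit x t).2) else (0, y :: t)

theorem runSplit_snd_le (x : List Char) : ∀ t : List (List Char), (runSplit x t).2.length ≤ t.length := by
  intro t
  induction t with
  | nil => simp [runSplit]
  | cons y t ih =>
    by_cases h : y = x
    · simp [runSplit, h]; omega
    · simp [runSplit, h]

-- A's outer 'while ss' loop building temp.
def compressA : List (List Char) → List Char
  | [] => []
  | x :: t =>
    (if (runSplit x t).1 + 1 = 1 then x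
     else PySem.Int.toChars (((runSplit x t).1 + 1 : Nat) : Int) ++ x) ++ compressA (runSplit x t).2
termination_by ss => ss.length
decreasing_by
  simpa using Nat.lt_succ_of_le (runSplit_snd_le x t)

def solution (s : String) : Int :=
  let cs := s.toList
  (PySem.List.pyRange 1 (cs.length : Int) 1).foldl
    (fun answer i => min answer ((compressA (chunksAux cs i cs.length 0)).length : Int))
    (cs.length : Int)

-- ===== PORT B =====

-- length contributed by a finished run: len(prev) + (len(str(cnt)) if cnt > 1 else 0)
def flushLen (p : List Char) (cnt : Int) : Int :=
  (p.length : Int) + (if 1 < cnt then ((PySem.Int.toChars cnt).length : Int) else 0)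

-- one step of B's state machine over the chunk list
def stepB (acc : Int × Option (List Char) × Int) (c : List Char) : Int × Option (List Char) × Int :=
  match acc with
  | (total, some p, cnt) =>
      if c = p then (total, some p, cnt + 1) else (total + flushLen p cnt, some c, 1)
  | (total, none, _) => (total, some c, 1)

def compLenB (chunks : List (List Char)) : Int :=
  match chunks.foldl stepB (0, none, 0) with
  | (total, some p, cnt) => total + flushLen p cnt
  | (total, none, _) => total

def solution_alt (s : String) : Int :=
  let cs := s.toList
  (PySem.List.pyRange 1 (cs.length : Int) 1).foldl
    (fun best i =>
      min best (compLenB ((PySem.List.pyRange 0 (cs.length : Int) i).map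
        (fun k => PySem.List.slice cs (some k) (some (k + i))))))
    (cs.length : Int)

-- ===== PRECONDITION & SPEC =====
def Spec_solution (s : String) (out : Int) : Prop := out = solution_alt s
instance (s : String) (out : Int) : Decidable (Spec_solution s out) := by unfold Spec_solution; infer_instance

-- ===== CLAIM (what is proved, stated in full; the proofs are below) =====
def Claim_equal_solution : Prop := ∀ (s : String), Dom_solution s → Spec_solution s (solution s)

-- ===== LEMMAS AND PROOFS =====

theorem pyRange_cons_of_pos (i j L : Int) (hi : 0 < i) (h : j < L) :
    PySem.List.pyRange j L i = j :: PySem.List.pyRange (j + i) L i := by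
  rw [PySem.List.pyRange_of_pos j L hi, PySem.List.pyRange_of_pos (j + i) L hi, if_pos h]
  by_cases h2 : j + i < L
  · rw [if_pos h2]
    have hc : ((L - j + i - 1) / i).toNat = ((L - (j + i) + i - 1) / i).toNat + 1 := by
      have he : L - j + i - 1 = (L - (j + i) + i - 1) + 1 * i := by ring
      rw [he, Int.add_mul_ediv_right _ _ (by omega : i ≠ 0)]
      have h4 : 0 ≤ (L - (j + i) + i - 1) / i := Int.ediv_nonneg (by omega) (by omega)
      omega
    rw [hc, List.range_succ_eq_map, List.map_cons, List.map_map]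
    congr 1
    · simp
    · apply List.map_congr_left
      intro k _
      simp [Function.comp]
      ring
  · rw [if_neg h2]
    have hc : ((L - j + i - 1) / i).toNat = 1 := by
      have he : L - j + i - 1 = (L - j - 1) + 1 * i := by ring
      rw [he, Int.add_mul_ediv_right _ _ (by omega : i ≠ 0)]
      have h0 : (L - j - 1) / i = 0 := Int.ediv_eq_zero_of_lt (by omega) (by omega)
      omega
    rw [hc]
    simp

theorem chunks_eq (cs : List Char) (i : Int) (hi : 0 < i) :
    ∀ (fuel : Nat) (j : Int), ((cs.length : Int) - j).toNat ≤ fuel →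
      chunksAux cs i fuel j =
        (PySem.List.pyRange j (cs.length : Int) i).map
          (fun k => PySem.List.slice cs (some k) (some (k + i))) := by
  intro fuel
  induction fuel with
  | zero =>
    intro j hj
    rw [PySem.List.pyRange_of_pos j _ hi, if_neg (by omega)]
    simp [chunksAux]
  | succ n ih =>
    intro j hj
    by_cases h : j < (cs.length : Int)
    · rw [pyRange_cons_of_pos i j _ hi h, List.map_cons]
      simp only [chunksAux, if_pos h]
      rw [ih (j + i) (by omega)]
    · rw [PySem.List.pyRange_of_pos j _ hi, if_neg h]
      simp [chunksAux, h]

def pendA (p : List Char) (cnt : Int) (ss : List (List Char)) : Int :=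
  flushLen p (cnt + ((runSplit p ss).1 : Int)) + ((compressA (runSplit p ss).2).length : Int)

theorem compressA_cons_len (x : List Char) (t : List (List Char)) :
    ((compressA (x :: t)).length : Int) = pendA x 1 t := by
  rw [compressA]
  by_cases h : (runSplit x t).1 = 0
  · simp [pendA, flushLen, h]
  · have h1 : ¬ ((runSplit x t).1 + 1 = 1) := by omega
    have h2 : (1 : Int) < 1 + ((runSplit x t).1 : Int) := by omega
    simp only [pendA, flushLen, if_neg h1, if_pos h2, List.length_append]
    push_cast
    ring_nf

theorem fold_pend (ss : List (List Char)) :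
    ∀ (total : Int) (p : List Char) (cnt : Int),
      (match ss.foldl stepB (total, some p, cnt) with
        | (t, some q, c) => t + flushLen q c
        | (t, none, _) => t) = total + pendA p cnt ss := by
  induction ss with
  | nil =>
    intro total p cnt
    simp [pendA, runSplit, compressA]
  | cons y t ih =>
    intro total p cnt
    by_cases hy : y = p
    · simp only [List.foldl_cons, stepB, if_pos hy]
      rw [ih total p (cnt + 1)]
      simp only [pendA, runSplit, if_pos hy]
      congr 2
      push_cast
      ring_nf
    · simp only [List.foldl_cons, stepB, if_neg hy]
      rw [ih (total + flushLen p cnt) y 1]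
      simp only [pendA, runSplit, if_neg hy]
      rw [compressA_cons_len]
      simp only [pendA]
      push_cast
      ring_nf
  
theorem compLenB_eq (ss : List (List Char)) :
    compLenB ss = ((compressA ss).length : Int) := by
  cases ss with
  | nil => simp [compLenB, compressA]
  | cons x t =>
    unfold compLenB
    rw [List.foldl_cons]
    show (match t.foldl stepB (stepB (0, none, 0) x) with
      | (total, some p, cnt) => total + flushLen p cnt
      | (total, none, _) => total) = _
    have hs : stepB (0, none, 0) x = (0, some x, 1) := rfl
    rw [hs, fold_pend t 0 x 1, compressA_cons_len]
    ring

-- ===== VERDICT (by name: the statement is the Claim_ definition above) =====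
theorem solution_spec : Claim_equal_solution := by
  intro s _
  unfold Spec_solution solution solution_alt
  apply PySem.List.foldl_congr_mem
  intro acc i hi
  have h1 : (1 : Int) ≤ i := (PySem.List.mem_pyRange_one.mp hi).1
  rw [chunks_eq s.toList i (by omega) s.toList.length 0 (by omega), compLenB_eq]
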